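-- pv_equiv track=rewrite | github.com/raeez/chiral-bar-cobar | compute/lib/cy_nc_deformation_k3e_engine.py | hh_hkr_decomposition_cy
-- ===== SOURCE A (Python) =====
-- from typing import Dict, List, Optional, Tuple
--
-- def hh_hkr_decomposition_cy(
--     h: Dict[Tuple[int, int], int],
--     d: int,
--     n: int,
-- ) -> Dict[Tuple[int, int], int]:
--     """HKR decomposition of HH^n for a CY d-fold.
--
--     Returns dict mapping (d-p, q) -> h^{d-p, q} for each piece
--     contributing to HH^n = bigoplus_{p+q=n} h^{d-p, q}.
--
--     The polyvector degree is p, the cohomological degree is q.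
--     The Hodge type of the contribution is (d-p, q).
--     """
--     pieces: Dict[Tuple[int, int], int] = {}
--     for p in range(d + 1):
--         q = n - p
--         if q < 0 or q > d:
--             continue
--         val = h.get((d - p, q), 0)
--         if val > 0:
--             pieces[(d - p, q)] = val
--     return pieces
-- ===== SOURCE B (Python) =====
-- def hh_hkr_decomposition_cy(h, d, n):
--     """HKR decomposition of HH^n for a CY d-fold.
--
--     Traverses the sparse input dict once: (i, j) contributes exactly when
--     j - i == n - d, 0 <= i <= d, 0 <= j <= d and h[(i, j)] > 0; the
--     contributions are emitted with i descending (= polyvector degree p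
--     ascending), matching the HKR ordering.
--     """
--     items = [(k, v) for k, v in h.items()
--              if v > 0 and 0 <= k[0] <= d and 0 <= k[1] <= d and k[1] - k[0] == n - d]
--     items.sort(key=lambda kv: kv[0][0], reverse=True)
--     return dict(items)
-- ===== Notes on version B (the rewrite author's own statement) =====
-- stated objective: idiomatic
-- what changed: Instead of scanning the dense index range p = 0..d and probing the dict at each step, B traverses the sparse dict h.items() once, filters entries by the degree constraints (j - i == n - d, 0 <= i,j <= d, value > 0), and sorts the hits by Hodge index descending to reproduce A's emission order.
import Mathlib
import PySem

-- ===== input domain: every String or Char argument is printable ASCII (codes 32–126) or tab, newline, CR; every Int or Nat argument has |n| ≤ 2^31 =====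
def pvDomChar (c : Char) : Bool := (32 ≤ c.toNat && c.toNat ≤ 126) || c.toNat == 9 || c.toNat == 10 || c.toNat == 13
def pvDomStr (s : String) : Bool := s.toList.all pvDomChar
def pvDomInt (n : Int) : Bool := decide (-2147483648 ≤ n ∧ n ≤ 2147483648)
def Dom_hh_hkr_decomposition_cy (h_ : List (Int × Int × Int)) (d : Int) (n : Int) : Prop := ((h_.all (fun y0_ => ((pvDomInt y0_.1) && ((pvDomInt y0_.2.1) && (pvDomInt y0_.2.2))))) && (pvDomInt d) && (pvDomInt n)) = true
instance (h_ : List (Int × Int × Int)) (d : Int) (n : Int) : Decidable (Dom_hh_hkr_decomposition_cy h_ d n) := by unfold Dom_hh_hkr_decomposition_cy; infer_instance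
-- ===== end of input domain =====

-- B filters the sparse dict once and sorts the hits by Hodge index descending, instead of
-- scanning the dense range p = 0..d; same return value (objective: alternative/idiomatic).

-- ===== PORT A =====
-- A's dict assignment pieces[(d-p, q)] = val is an append: the key (d-p, q) is fresh at
-- every iteration (d-p strictly decreases with p), so no overwrite can ever occur.
def hh_hkr_decomposition_cy (h_ : List (Int × Int × Int)) (d : Int) (n : Int) : List (Int × Int × Int) :=
  (PySem.List.pyRange 0 (d + 1) 1).foldl (fun pieces p =>
    let q := n - p
    if q < 0 ∨ q > d then pieces
    else
      let val := ((h_.find? (fun t => t.1 == d - p && t.2.1 == q)).map (fun t => t.2.2)).getD 0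
      if val > 0 then pieces ++ [(d - p, q, val)] else pieces) []

-- ===== PORT B =====
def hh_hkr_decomposition_cy_alt (h_ : List (Int × Int × Int)) (d : Int) (n : Int) : List (Int × Int × Int) :=
  PySem.List.sorted
    (h_.filter (fun t =>
      decide (0 < t.2.2) && decide (0 ≤ t.1) && decide (t.1 ≤ d) &&
      decide (0 ≤ t.2.1) && decide (t.2.1 ≤ d) && (t.2.1 - t.1 == n - d)))
    (fun t => t.1) true

-- ===== PRECONDITION & SPEC =====
-- Pre_ excludes association lists with a duplicated (i, j) key: a Python dict can never
-- contain one, so this excludes no input the Python program can receive.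
def Pre_hh_hkr_decomposition_cy (h_ : List (Int × Int × Int)) (d : Int) (n : Int) : Prop :=
  h_.Pairwise (fun a b => (a.1, a.2.1) ≠ (b.1, b.2.1))
instance (h_ : List (Int × Int × Int)) (d : Int) (n : Int) : Decidable (Pre_hh_hkr_decomposition_cy h_ d n) := by unfold Pre_hh_hkr_decomposition_cy; infer_instance

def pvWitness_hh_hkr_decomposition_cy : (List (Int × Int × Int)) × Int × Int := ([(1, 1, 2), (2, 2, 1)], 2, 2)

def Spec_hh_hkr_decomposition_cy (h_ : List (Int × Int × Int)) (d : Int) (n : Int) (out : List (Int × Int × Int)) : Prop := out = hh_hkr_decomposition_cy_alt h_ d n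
instance (h_ : List (Int × Int × Int)) (d : Int) (n : Int) (out : List (Int × Int × Int)) : Decidable (Spec_hh_hkr_decomposition_cy h_ d n out) := by unfold Spec_hh_hkr_decomposition_cy; infer_instance

-- ===== CLAIM (what is proved, stated in full; the proofs are below) =====
def Claim_equal_hh_hkr_decomposition_cy : Prop := ∀ (h_ : List (Int × Int × Int)) (d : Int) (n : Int), Dom_hh_hkr_decomposition_cy h_ d n → Pre_hh_hkr_decomposition_cy h_ d n → Spec_hh_hkr_decomposition_cy h_ d n (hh_hkr_decomposition_cy h_ d n)

-- ===== LEMMAS AND PROOFS =====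

-- the value A reads from the dict at step p
def pvV (h_ : List (Int × Int × Int)) (d n p : Int) : Int :=
  ((h_.find? (fun t => t.1 == d - p && t.2.1 == n - p)).map (fun t => t.2.2)).getD 0

-- B's filter predicate
def pvC (d n : Int) (t : Int × Int × Int) : Bool :=
  decide (0 < t.2.2) && decide (0 ≤ t.1) && decide (t.1 ≤ d) &&
  decide (0 ≤ t.2.1) && decide (t.2.1 ≤ d) && (t.2.1 - t.1 == n - d)

-- strictly key-decreasing (resp. key-distinct) lists have no duplicates
lemma pv_nodup_of_pairwise_gt {α κ : Type} [LinearOrder κ] {key : α → κ} {l : List α}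
    (h : l.Pairwise (fun a b => key b < key a)) : l.Nodup :=
  List.Pairwise.imp (fun hab he => by subst he; exact lt_irrefl _ hab) h

lemma pv_nodup_of_key_ne {l : List (Int × Int × Int)}
    (h : l.Pairwise (fun a b => (a.1, a.2.1) ≠ (b.1, b.2.1))) : l.Nodup :=
  List.Pairwise.imp (fun hab he => hab (by rw [he])) h

-- with pairwise-distinct keys, find? on a member's key returns exactly that member
lemma pv_findKey (h_ : List (Int × Int × Int)) (i j : Int) (t : Int × Int × Int)
    (pre : h_.Pairwise (fun a b => (a.1, a.2.1) ≠ (b.1, b.2.1)))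
    (ht : t ∈ h_) (hi : t.1 = i) (hj : t.2.1 = j) :
    h_.find? (fun s => s.1 == i && s.2.1 == j) = some t := by
  induction h_ with
  | nil => cases ht
  | cons a l ih =>
    rcases List.pairwise_cons.mp pre with ⟨hhead, htail⟩
    rcases List.mem_cons.mp ht with h | h
    · subst h
      simp [hi, hj]
    · have hne : (a.1, a.2.1) ≠ (t.1, t.2.1) := hhead t h
      have hpred : (a.1 == i && a.2.1 == j) = false := by
        simp only [Bool.and_eq_false_iff, beq_eq_false_iff_ne, ne_eq]
        by_cases h1 : a.1 = i
        · right; exact fun h2 => hne (by rw [h1, h2, hi, hj])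
        · left; exact h1
      rw [List.find?_cons, hpred]
      exact ih htail h

lemma pv_main (h_ : List (Int × Int × Int)) (d n : Int)
    (pre : h_.Pairwise (fun a b => (a.1, a.2.1) ≠ (b.1, b.2.1))) :
    hh_hkr_decomposition_cy h_ d n = hh_hkr_decomposition_cy_alt h_ d n := by
  -- rewrite A's loop body into a single-test append form
  have hstep :
      (fun (pieces : List (Int × Int × Int)) (p : Int) =>
        let q := n - p
        if q < 0 ∨ q > d then pieces
        else
          let val := ((h_.find? (fun t => t.1 == d - p && t.2.1 == q)).map (fun t => t.2.2)).getD 0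
          if val > 0 then pieces ++ [(d - p, q, val)] else pieces)
      = (fun pieces p =>
          if (decide (0 ≤ n - p) && decide (n - p ≤ d) && decide (0 < pvV h_ d n p)) then
            pieces ++ [(d - p, n - p, pvV h_ d n p)] else pieces) := by
    funext pieces p
    simp only [pvV]
    by_cases h1 : n - p < 0 ∨ n - p > d
    · rw [if_pos h1, if_neg]
      simp only [Bool.and_eq_true, decide_eq_true_eq, not_and]
      intro hc _; omega
    · rw [if_neg h1]
      by_cases h2 : ((h_.find? (fun t => t.1 == d - p && t.2.1 == n - p)).map (fun t => t.2.2)).getD 0 > 0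
      · rw [if_pos h2, if_pos]
        simp only [Bool.and_eq_true, decide_eq_true_eq]
        exact ⟨⟨by omega, by omega⟩, h2⟩
      · rw [if_neg h2, if_neg]
        simp only [Bool.and_eq_true, decide_eq_true_eq, not_and]
        intro _ hc; exact absurd hc h2
  have hA : hh_hkr_decomposition_cy h_ d n
      = ((PySem.List.pyRange 0 (d + 1) 1).filter
          (fun p => decide (0 ≤ n - p) && decide (n - p ≤ d) && decide (0 < pvV h_ d n p))).map
          (fun p => (d - p, n - p, pvV h_ d n p)) := by
    unfold hh_hkr_decomposition_cy
    rw [hstep, PySem.List.foldl_append_if]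
    simp
  -- the produced list has strictly decreasing first components
  have hpairL : (((PySem.List.pyRange 0 (d + 1) 1).filter
        (fun p => decide (0 ≤ n - p) && decide (n - p ≤ d) && decide (0 < pvV h_ d n p))).map
        (fun p => (d - p, n - p, pvV h_ d n p))).Pairwise
        (fun a b => (fun t : Int × Int × Int => t.1) b < (fun t : Int × Int × Int => t.1) a) := by
    have hpr : (PySem.List.pyRange 0 (d + 1) 1).Pairwise (fun a b => d - b < d - a) :=
      (PySem.List.pairwise_lt_pyRange_one 0 (d + 1)).imp (fun h => by omega)
    exact List.Pairwise.map _ (fun a b hab => hab) (List.Pairwise.filter _ hpr)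
  -- nodups on both sides
  have hnodupL := pv_nodup_of_pairwise_gt hpairL
  have hnodupF : (h_.filter (pvC d n)).Nodup := pv_nodup_of_key_ne (List.Pairwise.filter _ pre)
  -- membership both ways
  have hmem : ∀ t : Int × Int × Int,
      t ∈ ((PySem.List.pyRange 0 (d + 1) 1).filter
          (fun p => decide (0 ≤ n - p) && decide (n - p ≤ d) && decide (0 < pvV h_ d n p))).map
          (fun p => (d - p, n - p, pvV h_ d n p))
      ↔ t ∈ h_.filter (pvC d n) := by
    rintro ⟨t1, t2, t3⟩
    constructor
    · intro htL
      obtain ⟨p, hpf, hfp⟩ := List.mem_map.mp htL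
      obtain ⟨hpr, hPp⟩ := List.mem_filter.mp hpf
      obtain ⟨hp0, hpd⟩ := PySem.List.mem_pyRange_one.mp hpr
      have hPp' : 0 ≤ n - p ∧ n - p ≤ d ∧ 0 < pvV h_ d n p := by
        simpa [Bool.and_eq_true, decide_eq_true_eq, and_assoc] using hPp
      obtain ⟨hq0, hqd, hval⟩ := hPp'
      rcases hfo : h_.find? (fun t => t.1 == d - p && t.2.1 == n - p) with _ | a
      · exfalso; simp [pvV, hfo] at hval
      · obtain ⟨a1, a2, a3⟩ := a
        have hamem := List.mem_of_find?_eq_some hfo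
        have hpred := List.find?_some hfo
        simp only [Bool.and_eq_true, beq_iff_eq] at hpred
        have hva : pvV h_ d n p = a3 := by simp [pvV, hfo]
        have h1 : a1 = d - p := hpred.1
        have h2 : a2 = n - p := hpred.2
        have hval' : 0 < a3 := hva ▸ hval
        have hat : ((d - p, n - p, pvV h_ d n p) : Int × Int × Int) = (a1, a2, a3) := by
          rw [hva, ← h1, ← h2]
        rw [← hfp, hat]
        apply List.mem_filter.mpr
        refine ⟨hamem, ?_⟩
        simp only [pvC, Bool.and_eq_true, decide_eq_true_eq, beq_iff_eq, and_assoc]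
        exact ⟨hval', by omega, by omega, by omega, by omega, by omega⟩
    · intro htF
      obtain ⟨hth, hct⟩ := List.mem_filter.mp htF
      simp only [pvC, Bool.and_eq_true, decide_eq_true_eq, beq_iff_eq, and_assoc] at hct
      obtain ⟨hv, hi0, hid, hj0, hjd, hrel⟩ := hct
      have hfo := pv_findKey h_ t1 (n - (d - t1)) (t1, t2, t3) pre hth rfl (by simp; omega)
      have hva : pvV h_ d n (d - t1) = t3 := by simp [pvV, hfo]
      apply List.mem_map.mpr
      refine ⟨d - t1, List.mem_filter.mpr ⟨PySem.List.mem_pyRange_one.mpr ⟨by omega, by omega⟩, ?_⟩, ?_⟩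
      · simp only [Bool.and_eq_true, decide_eq_true_eq]
        exact ⟨⟨by omega, by omega⟩, by rw [hva]; exact hv⟩
      · have e1 : d - (d - t1) = t1 := by omega
        have e2 : n - (d - t1) = t2 := by omega
        rw [hva, e1, e2]
  have hperm := (List.perm_ext_iff_of_nodup hnodupL hnodupF).mpr hmem
  rw [hA]
  unfold hh_hkr_decomposition_cy_alt
  exact (PySem.List.sorted_rev_eq_of_perm_of_pairwise_gt _ _ (fun t => t.1) hperm hpairL).symm

-- ===== VERDICT (by name: the statement is the Claim_ definition above) =====
theorem hh_hkr_decomposition_cy_spec : Claim_equal_hh_hkr_decomposition_cy := by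
  intro h_ d n _ pre
  unfold Spec_hh_hkr_decomposition_cy
  exact pv_main h_ d n pre
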